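-- pv_equiv track=rewrite | github.com/duanebailey/CurlingNumberSequences | clib.py | abstractAB
-- ===== SOURCE A (Python) =====
-- def abstractAB(s):
--     r = ""
--     while len(s) > 0:
--         if s[:4] == "2232":
--             r += "A"
--             s = s[4:]
--         elif s[:9] == "322232223":
--             r += "B"
--             s = s[9:]
--         else:
--             r += s[0]
--             s = s[1:]
--     return r
-- ===== SOURCE B (Python) =====
-- def abstractAB(s):
--     out = []
--     i = 0
--     n = len(s)
--     while i < n:
--         if s[i:i+4] == "2232":
--             out.append("A")
--             i += 4
--         elif s[i:i+9] == "322232223":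
--             out.append("B")
--             i += 9
--         else:
--             out.append(s[i])
--             i += 1
--     return "".join(out)
-- ===== Notes on version B (the rewrite author's own statement) =====
-- stated objective: faster
-- what changed: Replaces A's repeated re-slicing of the whole remaining string (s = s[4:] etc.) and string concatenation with a single index pointer over the original string, comparing fixed-length windows and joining collected chunks once at the end.
import Mathlib
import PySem

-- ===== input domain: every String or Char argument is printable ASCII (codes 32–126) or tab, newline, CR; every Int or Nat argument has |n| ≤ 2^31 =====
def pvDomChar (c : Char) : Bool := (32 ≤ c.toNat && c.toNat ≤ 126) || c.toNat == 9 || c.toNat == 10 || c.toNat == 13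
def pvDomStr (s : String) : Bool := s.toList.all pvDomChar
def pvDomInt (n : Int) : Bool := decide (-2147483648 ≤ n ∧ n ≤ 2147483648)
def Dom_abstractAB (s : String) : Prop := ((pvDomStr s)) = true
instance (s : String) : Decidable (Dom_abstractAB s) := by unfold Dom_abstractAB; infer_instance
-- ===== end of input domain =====

-- B replaces A's repeated whole-string re-slicing and string concatenation by a single
-- index pointer with fixed-length window comparisons and one final join (objective: faster).

-- ===== PORT A =====
-- s[:k] / s[k:] with literal nonnegative k are exactly List.take k / List.drop k.
def abstractAB_loop (s : List Char) : List Char :=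
  if s.length > 0 then
    if s.take 4 = ['2', '2', '3', '2'] then
      'A' :: abstractAB_loop (s.drop 4)
    else if s.take 9 = ['3', '2', '2', '2', '3', '2', '2', '2', '3'] then
      'B' :: abstractAB_loop (s.drop 9)
    else
      s.headI :: abstractAB_loop (s.drop 1)
  else []
termination_by s.length
decreasing_by all_goals simp_all

def abstractAB (s : String) : String := String.ofList (abstractAB_loop s.toList)

-- ===== PORT B =====
-- s[i:i+k] with 0 ≤ i and literal k is exactly (s.drop i).take k.
def abstractAB_alt_loop (s : List Char) (i : Nat) (out : List (List Char)) : List (List Char) :=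
  if h : i < s.length then
    if (s.drop i).take 4 = ['2', '2', '3', '2'] then
      abstractAB_alt_loop s (i + 4) (out ++ [['A']])
    else if (s.drop i).take 9 = ['3', '2', '2', '2', '3', '2', '2', '2', '3'] then
      abstractAB_alt_loop s (i + 9) (out ++ [['B']])
    else
      abstractAB_alt_loop s (i + 1) (out ++ [[s[i]]])
  else out
termination_by s.length - i

def abstractAB_alt (s : String) : String :=
  String.ofList (abstractAB_alt_loop s.toList 0 []).flatten

-- ===== PRECONDITION & SPEC =====
def Spec_abstractAB (s : String) (out : String) : Prop := out = abstractAB_alt s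
instance (s : String) (out : String) : Decidable (Spec_abstractAB s out) := by unfold Spec_abstractAB; infer_instance

-- ===== CLAIM (what is proved, stated in full; the proofs are below) =====
def Claim_equal_abstractAB : Prop := ∀ (s : String), Dom_abstractAB s → Spec_abstractAB s (abstractAB s)

-- ===== LEMMAS AND PROOFS =====
theorem altLoop_eq (s : List Char) (i : Nat) (out : List (List Char)) :
    (abstractAB_alt_loop s i out).flatten = out.flatten ++ abstractAB_loop (s.drop i) := by
  induction i, out using abstractAB_alt_loop.induct (s := s) with
  | case1 i out h h4 ih =>
      rw [abstractAB_alt_loop, abstractAB_loop]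
      rw [dif_pos h, if_pos h4,
          if_pos (show (List.drop i s).length > 0 by simp; omega), if_pos h4]
      rw [ih]
      simp
  | case2 i out h h4 h9 ih =>
      rw [abstractAB_alt_loop, abstractAB_loop]
      rw [dif_pos h, if_neg h4, if_pos h9,
          if_pos (show (List.drop i s).length > 0 by simp; omega), if_neg h4, if_pos h9]
      rw [ih]
      simp
  | case3 i out h h4 h9 ih =>
      rw [abstractAB_alt_loop, abstractAB_loop]
      rw [dif_pos h, if_neg h4, if_neg h9,
          if_pos (show (List.drop i s).length > 0 by simp; omega), if_neg h4, if_neg h9]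
      rw [ih]
      have hd : s.drop i = s[i] :: s.drop (i + 1) := List.drop_eq_getElem_cons h
      have hh : (List.drop i s).headI = s[i] := by rw [hd]; rfl
      rw [List.drop_drop, hh]
      simp
  | case4 i out h =>
      rw [abstractAB_alt_loop, abstractAB_loop]
      simp only [dif_neg h]
      have : s.drop i = [] := by
        apply List.drop_eq_nil_of_le; omega
      simp [this]

-- ===== VERDICT (by name: the statement is the Claim_ definition above) =====
theorem abstractAB_spec : Claim_equal_abstractAB := by
  intro s _
  unfold Spec_abstractAB abstractAB abstractAB_alt
  rw [altLoop_eq]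
  simp
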